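-- pv_equiv track=rewrite | github.com/Biccamor/asd | czesc_sortowania/snow.py | solve
-- ===== SOURCE A (Python) =====
-- def solve(A):
--     A.sort(reverse=True)
--     ans = 0
--     for i in range(len(A)):
--         akt = A[i]-i
--         if akt < 0:
--             break
--         ans += akt
--
--     return ans
-- ===== SOURCE B (Python) =====
-- def solve(A):
--     # Same in-place descending sort (mutation preserved); equivalence is about the return value.
--     A.sort(reverse=True)
--     lo, hi = 0, len(A)
--     # A[i]-i is strictly decreasing, so binary-search the first index with A[i]-i < 0.
--     while lo < hi:
--         mid = (lo + hi) // 2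
--         if A[mid] - mid >= 0:
--             lo = mid + 1
--         else:
--             hi = mid
--     k = lo
--     # sum of (A[i]-i) for i < k, in closed form
--     return sum(A[:k]) - k * (k - 1) // 2
-- ===== Notes on version B (the rewrite author's own statement) =====
-- stated objective: alternative
-- what changed: B replaces A's linear break-scan with a running accumulator by a binary search for the crossing index k (A[i]-i is strictly decreasing after the descending sort) followed by the closed form sum(A[:k]) - k*(k-1)//2; the in-place sort and its mutation are kept.
import Mathlib
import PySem

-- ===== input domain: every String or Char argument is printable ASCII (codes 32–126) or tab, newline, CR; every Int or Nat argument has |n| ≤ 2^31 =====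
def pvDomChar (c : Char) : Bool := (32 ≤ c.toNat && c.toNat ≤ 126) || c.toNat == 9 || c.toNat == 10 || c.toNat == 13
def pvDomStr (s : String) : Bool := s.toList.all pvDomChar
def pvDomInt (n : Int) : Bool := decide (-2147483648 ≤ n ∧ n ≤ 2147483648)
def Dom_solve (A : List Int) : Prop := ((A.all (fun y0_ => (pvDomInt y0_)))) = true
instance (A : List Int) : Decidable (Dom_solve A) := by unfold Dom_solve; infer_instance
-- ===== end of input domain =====

-- B binary-searches the crossing index and uses a closed form instead of A's break-scan with an
-- accumulator; equivalence is about the RETURN value (both Pythons sort their argument in place identically).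

-- ===== PORT A =====
-- the 'for i in range(len(A)) … break' loop, as structural recursion over the sorted list with index i
def solveLoop : List Int → Nat → Int → Int
  | [], _, ans => ans
  | x :: xs, i, ans =>
    let akt := x - (i : Int)
    if akt < 0 then ans else solveLoop xs (i + 1) (ans + akt)

def solve (A : List Int) : Int :=
  solveLoop (PySem.List.sorted A (fun x => x) true) 0 0

-- ===== PORT B =====
-- the 'while lo < hi' binary search; A[mid] is read with getD, exact here since 0 ≤ lo ≤ mid < hi ≤ len;
-- (lo+hi)//2 on the nonnegative lo, hi is Nat division
def bsLoop (S : List Int) (lo hi : Nat) : Nat :=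
  if lo < hi then
    let mid := (lo + hi) / 2
    if 0 ≤ S.getD mid 0 - (mid : Int) then bsLoop S (mid + 1) hi else bsLoop S lo mid
  else lo
termination_by hi - lo
decreasing_by all_goals omega

def solve_alt (A : List Int) : Int :=
  let S := PySem.List.sorted A (fun x => x) true
  let k := bsLoop S 0 S.length
  (S.take k).sum - PySem.Int.floordiv ((k : Int) * ((k : Int) - 1)) 2

-- ===== PRECONDITION & SPEC =====
def Spec_solve (A : List Int) (out : Int) : Prop := out = solve_alt A
instance (A : List Int) (out : Int) : Decidable (Spec_solve A out) := by unfold Spec_solve; infer_instance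

-- ===== CLAIM (what is proved, stated in full; the proofs are below) =====
def Claim_equal_solve : Prop := ∀ (A : List Int), Dom_solve A → Spec_solve A (solve A)

-- ===== LEMMAS AND PROOFS =====

-- proof-side helper: the first index k with S[k]-k < 0, by a linear walk (used only to state the
-- characterisation shared by A's break-scan and B's binary search)
def kLoop : List Int → Nat → Nat
  | [], k => k
  | x :: xs, k => if (k : Int) ≤ x then kLoop xs (k + 1) else k

theorem kLoop_ge (xs : List Int) : ∀ i : Nat, i ≤ kLoop xs i := by
  induction xs with
  | nil => intro i; simp [kLoop]
  | cons x xs ih =>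
    intro i
    simp only [kLoop]
    split
    · exact le_trans (Nat.le_succ i) (ih (i + 1))
    · exact le_refl i

theorem kLoop_le (xs : List Int) : ∀ i : Nat, kLoop xs i ≤ i + xs.length := by
  induction xs with
  | nil => intro i; simp [kLoop]
  | cons x xs ih =>
    intro i
    simp only [kLoop, List.length_cons]
    split
    · have := ih (i + 1); omega
    · omega

-- the characterisation of kLoop: everything before it is ≥ its index, and it is the length or < its index
theorem kLoop_char (xs : List Int) : ∀ i : Nat,
    (∀ j : Nat, i ≤ j → j < kLoop xs i → (j : Int) ≤ xs.getD (j - i) 0) ∧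
    (kLoop xs i = i + xs.length ∨ xs.getD (kLoop xs i - i) 0 < (kLoop xs i : Int)) := by
  induction xs with
  | nil =>
    intro i
    refine ⟨fun j h1 h2 => by simp [kLoop] at h2; omega, ?_⟩
    simp [kLoop]
  | cons x xs ih =>
    intro i
    simp only [kLoop]
    split
    · rename_i hx
      obtain ⟨ih1, ih2⟩ := ih (i + 1)
      have hge := kLoop_ge xs (i + 1)
      constructor
      · intro j h1 h2
        rcases Nat.eq_or_lt_of_le h1 with rfl | hlt
        · simpa using hx
        · have hj : j - i = (j - (i + 1)) + 1 := by omega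
          rw [hj]
          simpa using ih1 j (by omega) h2
      · have hk : kLoop xs (i + 1) - i = (kLoop xs (i + 1) - (i + 1)) + 1 := by omega
        rw [hk]
        simp only [List.length_cons, List.getD_cons_succ]
        omega
    · rename_i hx
      refine ⟨fun j h1 h2 => by omega, Or.inr ?_⟩
      simp only [Nat.sub_self, List.getD_cons_zero]
      omega

-- the accumulator loop equals the prefix sum minus the arithmetic series, doubled to avoid division
theorem solveLoop_closed (xs : List Int) : ∀ (i : Nat) (ans : Int),
    2 * solveLoop xs i ans =
      2 * ans + 2 * ((xs.take (kLoop xs i - i)).sum)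
        + (i : Int) * ((i : Int) - 1)
        - (kLoop xs i : Int) * ((kLoop xs i : Int) - 1) := by
  induction xs with
  | nil => intro i ans; simp [solveLoop, kLoop]
  | cons x xs ih =>
    intro i ans
    by_cases h : (i : Int) ≤ x
    · have hlt : ¬ (x - (i : Int) < 0) := by omega
      have hk : i + 1 ≤ kLoop xs (i + 1) := kLoop_ge xs (i + 1)
      have htake : kLoop xs (i + 1) - i = (kLoop xs (i + 1) - (i + 1)) + 1 := by omega
      simp only [solveLoop, kLoop, if_pos h, if_neg hlt, htake, List.take_succ_cons]
      rw [ih (i + 1) (ans + (x - (i : Int)))]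
      have hc : ((i + 1 : Nat) : Int) = (i : Int) + 1 := by push_cast; ring
      rw [hc]
      simp only [List.sum_cons]
      ring
    · have hlt : x - (i : Int) < 0 := by omega
      simp only [solveLoop, kLoop, if_neg h, if_pos hlt]
      simp only [Nat.sub_self, List.take_zero, List.sum_nil]
      ring

theorem floordiv_half (k : Nat) :
    2 * PySem.Int.floordiv ((k : Int) * ((k : Int) - 1)) 2 = (k : Int) * ((k : Int) - 1) := by
  obtain ⟨t, ht⟩ : Even ((k : Int) * ((k : Int) - 1)) := by
    have h0 : Even (((k : Int) - 1) * (((k : Int) - 1) + 1)) := Int.even_mul_succ_self _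
    have e : ((k : Int) - 1) + 1 = (k : Int) := by ring
    rw [e, mul_comm] at h0
    exact h0
  rw [ht, PySem.Int.floordiv_eq_ediv_of_pos (by norm_num : (0:Int) < 2)]
  have : t + t = 2 * t := by ring
  rw [this, Int.mul_ediv_cancel_left t (by norm_num : (2:Int) ≠ 0)]

-- on a descending list, S[j]-j is antitone in the index
theorem getD_mono_of_pairwise (S : List Int) (hp : S.Pairwise (fun a b => b ≤ a)) :
    ∀ i j : Nat, i ≤ j → j < S.length → S.getD j 0 - (j : Int) ≤ S.getD i 0 - (i : Int) := by
  intro i j hij hj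
  rcases Nat.eq_or_lt_of_le hij with rfl | hlt
  · exact le_refl _
  · have hi : i < S.length := lt_trans hlt hj
    have hRel : S[j] ≤ S[i] := (List.pairwise_iff_getElem.mp hp) i j hi hj hlt
    rw [List.getD_eq_getElem S 0 hj, List.getD_eq_getElem S 0 hi]
    have : (i : Int) ≤ (j : Int) := by exact_mod_cast Nat.le_of_lt hlt
    omega

-- the binary search maintains the crossing invariants and so lands on the characterised index
theorem bs_char (S : List Int)
    (hmono : ∀ i j : Nat, i ≤ j → j < S.length → S.getD j 0 - (j : Int) ≤ S.getD i 0 - (i : Int)) :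
    ∀ (d lo hi : Nat), hi - lo ≤ d → lo ≤ hi → hi ≤ S.length →
    (∀ i : Nat, i < lo → (i : Int) ≤ S.getD i 0) →
    (∀ i : Nat, hi ≤ i → i < S.length → S.getD i 0 < (i : Int)) →
    (∀ i : Nat, i < bsLoop S lo hi → (i : Int) ≤ S.getD i 0) ∧ bsLoop S lo hi ≤ S.length ∧
      (bsLoop S lo hi = S.length ∨ S.getD (bsLoop S lo hi) 0 < (bsLoop S lo hi : Int)) := by
  intro d
  induction d with
  | zero =>
    intro lo hi hd hle hn hlow hhigh
    have heq : lo = hi := by omega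
    rw [bsLoop, if_neg (by omega)]
    refine ⟨hlow, by omega, ?_⟩
    by_cases h : lo = S.length
    · exact Or.inl h
    · exact Or.inr (hhigh lo (by omega) (by omega))
  | succ d ih =>
    intro lo hi hd hle hn hlow hhigh
    by_cases hlt : lo < hi
    · rw [bsLoop, if_pos hlt]
      simp only
      set mid := (lo + hi) / 2 with hmid
      have hm1 : lo ≤ mid := by omega
      have hm2 : mid < hi := by omega
      by_cases hc : 0 ≤ S.getD mid 0 - (mid : Int)
      · rw [if_pos hc]
        refine ih (mid + 1) hi (by omega) (by omega) hn ?_ hhigh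
        intro i hi'
        by_cases hil : i < lo
        · exact hlow i hil
        · have := hmono i mid (by omega) (by omega)
          omega
      · rw [if_neg hc]
        refine ih lo mid (by omega) (by omega) (by omega) hlow ?_
        intro i hmi hiS
        have := hmono mid i hmi hiS
        omega
    · rw [bsLoop, if_neg hlt]
      refine ⟨hlow, by omega, ?_⟩
      by_cases h : lo = S.length
      · exact Or.inl h
      · exact Or.inr (hhigh lo (by omega) (by omega))

-- ===== VERDICT (by name: the statement is the Claim_ definition above) =====
theorem solve_spec : Claim_equal_solve := by
  intro A _
  unfold Spec_solve solve solve_alt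
  set S := PySem.List.sorted A (fun x => x) true with hS
  have hpair : S.Pairwise (fun a b => b ≤ a) := by
    rw [hS]; exact PySem.List.sorted_pairwise_rev A (fun x => x)
  have hmono := getD_mono_of_pairwise S hpair
  -- characterisation of the binary-search result
  obtain ⟨hb1, hb2, hb3⟩ :=
    bs_char S hmono S.length 0 S.length (by omega) (by omega) (le_refl _)
      (fun i h => absurd h (by omega)) (fun i h1 h2 => absurd h2 (by omega))
  set k2 := bsLoop S 0 S.length with hk2
  -- characterisation of kLoop
  obtain ⟨ha1, ha2⟩ := kLoop_char S 0
  have hle1 := kLoop_le S 0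
  set k1 := kLoop S 0 with hk1
  simp only [Nat.zero_add, Nat.sub_zero] at ha1 ha2 hle1
  -- the two indices agree (the crossing index is unique)
  have hkk : k1 = k2 := by
    by_cases h12 : k1 < k2
    · have h1 := hb1 k1 h12
      rcases ha2 with h | h
      · omega
      · omega
    · by_cases h21 : k2 < k1
      · have h1 := ha1 k2 (by omega) h21
        rcases hb3 with h | h
        · omega
        · omega
      · omega
  show solveLoop S 0 0 = (S.take k2).sum - PySem.Int.floordiv ((k2 : Int) * ((k2 : Int) - 1)) 2
  have h := solveLoop_closed S 0 0
  rw [← hk1, hkk] at h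
  simp only [Nat.sub_zero] at h
  have hf := floordiv_half k2
  omega
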